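-- pv_equiv track=rewrite | github.com/taizoku/hackerrank | w36/revisedRussianRoulette.py | revisedRussianRoulette
-- ===== SOURCE A (Python) =====
-- def revisedRussianRoulette(doors):
--     previous_door_locked = False
--     min = max = 0
--     for door in doors:
--         if door == 0:
--             if previous_door_locked is True:
--                 min += 1 # bug for 1 at end
--                 previous_door_locked = False
--
--         if door == 1:
--             if previous_door_locked is True:
--                 min += 1
--                 previous_door_locked = False
--
--             else:
--                 previous_door_locked = True
--             max += 1
--     return min, max
-- ===== SOURCE B (Python) =====
-- def revisedRussianRoulette(doors):
--     # A shot on a locked door clears it together with the next relevant door,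
--     # so the minimum number of shots is the number of complete pairs formed by
--     # greedily matching each 1 with the element right after it in the 0/1
--     # subsequence of doors.
--     relevant = [d for d in doors if d == 0 or d == 1]
--     mn = 0
--     i = 0
--     while i < len(relevant):
--         if relevant[i] == 1:
--             if i + 1 < len(relevant):
--                 mn += 1
--             i += 2
--         else:
--             i += 1
--     return mn, doors.count(1)
-- ===== Notes on version B (the rewrite author's own statement) =====
-- stated objective: alternative
-- what changed: B drops A's previous_door_locked flag: max is doors.count(1), and min is obtained by first filtering doors to its 0/1 subsequence and then counting complete pairs with a step-2 index loop that pairs each 1 with the element right after it.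
import Mathlib
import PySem

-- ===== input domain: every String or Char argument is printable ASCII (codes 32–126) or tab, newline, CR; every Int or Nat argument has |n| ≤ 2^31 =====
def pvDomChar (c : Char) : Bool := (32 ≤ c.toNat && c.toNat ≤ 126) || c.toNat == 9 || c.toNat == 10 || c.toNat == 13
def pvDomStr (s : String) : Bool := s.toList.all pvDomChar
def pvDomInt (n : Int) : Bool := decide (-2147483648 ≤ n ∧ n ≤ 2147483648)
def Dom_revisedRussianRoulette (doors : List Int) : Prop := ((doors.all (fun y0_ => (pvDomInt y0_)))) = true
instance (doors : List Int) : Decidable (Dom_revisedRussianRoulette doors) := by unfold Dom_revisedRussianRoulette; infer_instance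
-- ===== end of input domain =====

-- B replaces A's previous_door_locked flag by doors.count(1) for max and, for min,
-- a pair count over the 0/1 subsequence of doors (step-2 index loop).

-- ===== PORT A =====
-- state: (previous_door_locked, min, max); the two 'if's of A's body are
-- exclusive (door == 0 vs door == 1), ported in the same order.
def revisedRussianRoulette (doors : List Int) : Int × Int :=
  let s := doors.foldl
    (fun (st : Bool × Int × Int) door =>
      let st :=
        if door = 0 then
          (if st.1 then (false, st.2.1 + 1, st.2.2) else st)
        else st
      if door = 1 then
        (if st.1 then (false, st.2.1 + 1, st.2.2 + 1) else (true, st.2.1, st.2.2 + 1))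
      else st)
    (false, 0, 0)
  (s.2.1, s.2.2)

-- ===== PORT B =====
-- the while loop of Source B over the filtered list: index i, accumulating mn
def pairIdx (rel : List Int) (i : Nat) : Int :=
  if i < rel.length then
    if rel.getD i 0 = 1 then
      (if i + 1 < rel.length then 1 else 0) + pairIdx rel (i + 2)
    else pairIdx rel (i + 1)
  else 0
termination_by rel.length - i

def revisedRussianRoulette_alt (doors : List Int) : Int × Int :=
  let relevant := doors.filter (fun d => d = 0 ∨ d = 1)
  (pairIdx relevant 0, (PySem.List.count doors 1 : Int))

-- ===== PRECONDITION & SPEC =====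
def Spec_revisedRussianRoulette (doors : List Int) (out : Int × Int) : Prop := out = revisedRussianRoulette_alt doors
instance (doors : List Int) (out : Int × Int) : Decidable (Spec_revisedRussianRoulette doors out) := by unfold Spec_revisedRussianRoulette; infer_instance

-- ===== CLAIM (what is proved, stated in full; the proofs are below) =====
def Claim_equal_revisedRussianRoulette : Prop := ∀ (doors : List Int), Dom_revisedRussianRoulette doors → Spec_revisedRussianRoulette doors (revisedRussianRoulette doors)

-- ===== LEMMAS AND PROOFS =====

-- list-level version of B's pairing loop, used only in the proofs
def pMin : List Int → Int
  | [] => 0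
  | [_] => 0
  | d :: x :: r => if d = 1 then 1 + pMin r else pMin (x :: r)

theorem pMin_one_cons (x : Int) (r : List Int) : pMin (1 :: x :: r) = 1 + pMin r := by
  simp [pMin]

theorem pMin_ne {d : Int} (r : List Int) (h : d ≠ 1) : pMin (d :: r) = pMin r := by
  cases r <;> simp [pMin, h]

-- the min A computes from a given flag state, written recursively
def gmin : Bool → List Int → Int
  | _, [] => 0
  | locked, d :: r =>
      if d = 0 then (if locked then 1 + gmin false r else gmin false r)
      else if d = 1 then (if locked then 1 + gmin false r else gmin true r)
      else gmin locked r

theorem foldA_eq (l : List Int) : ∀ (locked : Bool) (mn mx : Int),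
    (l.foldl
      (fun (st : Bool × Int × Int) door =>
        let st :=
          if door = 0 then
            (if st.1 then (false, st.2.1 + 1, st.2.2) else st)
          else st
        if door = 1 then
          (if st.1 then (false, st.2.1 + 1, st.2.2 + 1) else (true, st.2.1, st.2.2 + 1))
        else st)
      (locked, mn, mx)).2
    = (mn + gmin locked l, mx + (l.count 1 : Int)) := by
  induction l with
  | nil => intro locked mn mx; simp [gmin]
  | cons d r ih =>
      intro locked mn mx
      by_cases h0 : d = 0
      · subst h0
        cases locked <;> simp [List.foldl_cons, gmin, ih] <;> ring_nf
      · by_cases h1 : d = 1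
        · subst h1
          cases locked <;> simp [List.foldl_cons, gmin, ih, h0] <;> ring_nf <;> simp
        · cases locked <;> simp [List.foldl_cons, gmin, ih, h0, h1]

-- non-0/1 doors leave A's state untouched: gmin only sees the filtered list
theorem gmin_filter (l : List Int) : ∀ locked,
    gmin locked l = gmin locked (l.filter (fun d => d = 0 ∨ d = 1)) := by
  induction l with
  | nil => intro locked; simp
  | cons d r ih =>
      intro locked
      by_cases h0 : d = 0
      · subst h0; simp [gmin, List.filter_cons, ih]
      · by_cases h1 : d = 1
        · subst h1; simp [gmin, List.filter_cons, ih]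
        · simp [gmin, h0, h1, List.filter_cons, ih]

-- on a 0/1-only list, A's min equals B's pair count
theorem gmin_false_eq_pMin (l : List Int) (hb : ∀ d ∈ l, d = 0 ∨ d = 1) :
    gmin false l = pMin l := by
  induction hn : l.length using Nat.strong_induction_on generalizing l with
  | _ n ih =>
    cases l with
    | nil => simp [gmin, pMin]
    | cons d r =>
        by_cases h1 : d = 1
        · subst h1
          rw [show gmin false (1 :: r) = gmin true r by simp [gmin]]
          cases r with
          | nil => simp [gmin, pMin]
          | cons x r' =>
              have hx : x = 0 ∨ x = 1 := hb x (by simp)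
              have hg : gmin true (x :: r') = 1 + gmin false r' := by
                rcases hx with hx | hx <;> subst hx <;> simp [gmin]
              rw [hg, pMin_one_cons]
              rw [ih r'.length (by subst hn; simp) r'
                (fun d hd => hb d (by simp [hd])) rfl]
        · by_cases h0 : d = 0
          · subst h0
            rw [show gmin false (0 :: r) = gmin false r by simp [gmin]]
            rw [pMin_ne r (by norm_num)]
            exact ih r.length (by subst hn; simp) r (fun d hd => hb d (by simp [hd])) rfl
          · exact absurd (hb d (by simp)) (by simp [h0, h1])

-- B's index loop computes pMin of the dropped suffix
theorem pairIdx_drop (rel : List Int) (i : Nat) :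
    pairIdx rel i = pMin (rel.drop i) := by
  induction hn : rel.length - i using Nat.strong_induction_on generalizing i with
  | _ n ih =>
    by_cases h : i < rel.length
    · have hd : rel.drop i = rel[i] :: rel.drop (i + 1) := List.drop_eq_getElem_cons h
      have hg : rel.getD i 0 = rel[i] := by
        simp [List.getD_eq_getElem?_getD, List.getElem?_eq_getElem h]
      by_cases h1 : rel[i] = 1
      · rw [pairIdx, if_pos h, hg, if_pos h1, hd, h1]
        by_cases h2 : i + 1 < rel.length
        · have hd2 : rel.drop (i + 1) = rel[i+1] :: rel.drop (i + 2) :=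
            List.drop_eq_getElem_cons h2
          rw [hd2, pMin_one_cons, if_pos h2]
          rw [ih (rel.length - (i + 2)) (by omega) (i + 2) rfl]
        · have he : rel.drop (i + 1) = [] := List.drop_eq_nil_of_le (by omega)
          have hz : pairIdx rel (i + 2) = 0 := by
            rw [pairIdx, if_neg (by omega)]
          rw [he, if_neg h2, hz]
          simp [pMin]
      · rw [pairIdx, if_pos h, hg, if_neg h1, hd, pMin_ne _ h1]
        exact ih (rel.length - (i + 1)) (by omega) (i + 1) rfl
    · rw [pairIdx, if_neg h, List.drop_eq_nil_of_le (by omega), pMin]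

-- ===== VERDICT (by name: the statement is the Claim_ definition above) =====
theorem revisedRussianRoulette_spec : Claim_equal_revisedRussianRoulette := by
  intro doors _
  show revisedRussianRoulette doors = revisedRussianRoulette_alt doors
  unfold revisedRussianRoulette revisedRussianRoulette_alt
  simp only [foldA_eq, PySem.List.count]
  rw [pairIdx_drop, List.drop_zero,
    ← gmin_false_eq_pMin _ (by intro d hd; simpa using (List.mem_filter.mp hd).2),
    ← gmin_filter]
  simp
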